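-- pv_equiv track=rewrite | github.com/DrC-0/spellisp | lispell.py | getpolypath
-- ===== SOURCE A (Python) =====
-- def getpolypath(xylist):
--     res = []
--     if len(xylist) > 1:
--         for i in range(len(xylist)):
--             if i == len(xylist) - 1:
--                 res.append([xylist[i][0], xylist[i][1], xylist[0][0], xylist[0][1]])
--             else:
--                 res.append([xylist[i][0], xylist[i][1], xylist[i+1][0], xylist[i+1][1]])
--         return res
--     else:
--         return xylist
-- ===== SOURCE B (Python) =====
-- def getpolypath(xylist):
--     if len(xylist) <= 1:
--         return xylist
--
--     def edges(cur, rest):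
--         if not rest:
--             return [[cur[0], cur[1], xylist[0][0], xylist[0][1]]]
--         nxt = rest[0]
--         return [[cur[0], cur[1], nxt[0], nxt[1]]] + edges(nxt, rest[1:])
--
--     return edges(xylist[0], xylist[1:])
-- ===== Notes on version B (the rewrite author's own statement) =====
-- stated objective: alternative
-- what changed: Replaces A's index loop over range(len) with its last-index wrap branch by a structural recursion that walks the tail of the vertex list carrying the current vertex, emitting one edge per step and the closing edge to the first vertex in the empty-tail base case (no indices at all).
import Mathlib
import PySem

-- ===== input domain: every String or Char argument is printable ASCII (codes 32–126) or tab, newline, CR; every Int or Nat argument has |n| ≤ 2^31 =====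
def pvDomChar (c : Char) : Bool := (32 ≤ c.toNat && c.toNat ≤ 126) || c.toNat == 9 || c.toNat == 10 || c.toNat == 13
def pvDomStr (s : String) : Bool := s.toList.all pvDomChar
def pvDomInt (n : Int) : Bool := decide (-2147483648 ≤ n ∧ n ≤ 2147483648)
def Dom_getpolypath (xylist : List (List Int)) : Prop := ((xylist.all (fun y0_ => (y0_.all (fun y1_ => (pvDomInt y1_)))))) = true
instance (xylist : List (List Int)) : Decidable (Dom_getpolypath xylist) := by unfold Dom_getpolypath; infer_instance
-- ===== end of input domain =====

-- B replaces A's index loop (with its wrap-around branch at the last index) by a structural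
-- recursion over the tail carrying the current vertex; objective: alternative, same cost.

-- ===== PORT A =====
def getpolypath (xylist : List (List Int)) : List (List Int) :=
  if xylist.length > 1 then
    (PySem.List.pyRange 0 xylist.length 1).foldl
      (fun res i =>
        if i = (xylist.length : Int) - 1 then
          res ++ [[PySem.List.pyGetD (PySem.List.pyGetD xylist i []) 0 0,
                   PySem.List.pyGetD (PySem.List.pyGetD xylist i []) 1 0,
                   PySem.List.pyGetD (PySem.List.pyGetD xylist 0 []) 0 0,
                   PySem.List.pyGetD (PySem.List.pyGetD xylist 0 []) 1 0]]
        else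
          res ++ [[PySem.List.pyGetD (PySem.List.pyGetD xylist i []) 0 0,
                   PySem.List.pyGetD (PySem.List.pyGetD xylist i []) 1 0,
                   PySem.List.pyGetD (PySem.List.pyGetD xylist (i + 1) []) 0 0,
                   PySem.List.pyGetD (PySem.List.pyGetD xylist (i + 1) []) 1 0]]) []
  else xylist

-- ===== PORT B =====
-- B-side helper: the inner recursive 'edges(cur, rest)' of Source B, with the first vertex
-- (captured from the enclosing scope in Python) passed explicitly.
def getpolypathEdges (first : List Int) (cur : List Int) : List (List Int) → List (List Int)
  | [] => [[PySem.List.pyGetD cur 0 0, PySem.List.pyGetD cur 1 0,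
            PySem.List.pyGetD first 0 0, PySem.List.pyGetD first 1 0]]
  | nxt :: rest =>
      [PySem.List.pyGetD cur 0 0, PySem.List.pyGetD cur 1 0,
       PySem.List.pyGetD nxt 0 0, PySem.List.pyGetD nxt 1 0] ::
        getpolypathEdges first nxt rest

def getpolypath_alt (xylist : List (List Int)) : List (List Int) :=
  if xylist.length ≤ 1 then xylist
  else
    match xylist with
    | [] => []   -- unreachable under the guard
    | x0 :: rest => getpolypathEdges x0 x0 rest

-- ===== PRECONDITION & SPEC =====
-- Pre_ excludes exactly the inputs where A raises IndexError: more than one vertex with some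
-- vertex list shorter than 2 (xylist[i][1] then raises; B raises there too).
def Pre_getpolypath (xylist : List (List Int)) : Prop :=
  xylist.length ≤ 1 ∨ ∀ l ∈ xylist, 2 ≤ l.length
instance (xylist : List (List Int)) : Decidable (Pre_getpolypath xylist) := by
  unfold Pre_getpolypath; infer_instance
def pvWitness_getpolypath : List (List Int) := [[0, 0], [3, 0], [0, 4]]
def Spec_getpolypath (xylist : List (List Int)) (out : List (List Int)) : Prop := out = getpolypath_alt xylist
instance (xylist : List (List Int)) (out : List (List Int)) : Decidable (Spec_getpolypath xylist out) := by unfold Spec_getpolypath; infer_instance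

-- ===== CLAIM (what is proved, stated in full; the proofs are below) =====
def Claim_equal_getpolypath : Prop := ∀ (xylist : List (List Int)), Dom_getpolypath xylist → Pre_getpolypath xylist → Spec_getpolypath xylist (getpolypath xylist)

-- ===== LEMMAS AND PROOFS =====

-- the edge built from rows a and b
def pvEdge (a b : List Int) : List Int :=
  [PySem.List.pyGetD a 0 0, PySem.List.pyGetD a 1 0,
   PySem.List.pyGetD b 0 0, PySem.List.pyGetD b 1 0]

-- the per-index edge builder A's loop body appends
def pvF (xylist : List (List Int)) (i : Int) : List Int :=
  if i = (xylist.length : Int) - 1 then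
    pvEdge (PySem.List.pyGetD xylist i []) (PySem.List.pyGetD xylist 0 [])
  else
    pvEdge (PySem.List.pyGetD xylist i []) (PySem.List.pyGetD xylist (i + 1) [])

theorem getpolypath_eq_map (xylist : List (List Int)) (h : 1 < xylist.length) :
    getpolypath xylist = (PySem.List.pyRange 0 xylist.length 1).map (pvF xylist) := by
  unfold getpolypath
  rw [if_pos h]
  have hfun : (fun (res : List (List Int)) (i : Int) =>
      if i = (xylist.length : Int) - 1 then
        res ++ [[PySem.List.pyGetD (PySem.List.pyGetD xylist i []) 0 0,
                 PySem.List.pyGetD (PySem.List.pyGetD xylist i []) 1 0,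
                 PySem.List.pyGetD (PySem.List.pyGetD xylist 0 []) 0 0,
                 PySem.List.pyGetD (PySem.List.pyGetD xylist 0 []) 1 0]]
      else
        res ++ [[PySem.List.pyGetD (PySem.List.pyGetD xylist i []) 0 0,
                 PySem.List.pyGetD (PySem.List.pyGetD xylist i []) 1 0,
                 PySem.List.pyGetD (PySem.List.pyGetD xylist (i + 1) []) 0 0,
                 PySem.List.pyGetD (PySem.List.pyGetD xylist (i + 1) []) 1 0]])
      = (fun res i => res ++ [pvF xylist i]) := by
    funext res i
    unfold pvF pvEdge
    split_ifs <;> rfl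
  rw [hfun, PySem.List.foldl_append_singleton_eq_map]
  simp

-- B's recursion, characterised as the map of pvEdge over consecutive pairs with wrap to 'first'
theorem edges_eq_zip_map (first : List Int) :
    ∀ (rest : List (List Int)) (cur : List Int),
      getpolypathEdges first cur rest
        = ((cur :: rest).zip (rest ++ [first])).map (fun ab => pvEdge ab.1 ab.2) := by
  intro rest
  induction rest with
  | nil => intro cur; simp [getpolypathEdges, pvEdge]
  | cons nxt rs ih =>
      intro cur
      simp only [getpolypathEdges, ih nxt, List.cons_append, List.zip_cons_cons, List.map_cons]
      rfl

theorem rotated_getElem_last (xylist : List (List Int)) (h : 1 < xylist.length)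
    (k : Nat) (_hk : k < xylist.length) (hkn : k = xylist.length - 1) :
    (List.drop 1 xylist ++ List.take 1 xylist)[k]'(by simp; omega) = xylist[0]'(by omega) := by
  rw [List.getElem_append_right (by simp; omega)]
  rw [List.getElem_take]
  congr 1
  simp
  omega

theorem rotated_getElem_mid (xylist : List (List Int))
    (k : Nat) (hklt : k + 1 < xylist.length) :
    (List.drop 1 xylist ++ List.take 1 xylist)[k]'(by simp; omega) = xylist[k + 1]'hklt := by
  rw [List.getElem_append_left (by simp; omega)]
  rw [List.getElem_drop]
  congr 1
  omega

-- A, characterised as the same zip-map over the list against its once-rotated copy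
theorem getpolypath_eq_zip_map (xylist : List (List Int)) (h : 1 < xylist.length) :
    getpolypath xylist
      = (xylist.zip (xylist.drop 1 ++ xylist.take 1)).map (fun ab => pvEdge ab.1 ab.2) := by
  rw [getpolypath_eq_map xylist h]
  have hrow : ∀ (j : Nat) (hj : j < xylist.length),
      PySem.List.pyGetD xylist (j : Int) [] = xylist[j]'hj := by
    intro j hj
    rw [PySem.List.pyGetD_natCast]
    exact List.getD_eq_getElem xylist [] hj
  apply List.ext_getElem
  · simp [PySem.List.length_pyRange_one]
    omega
  · intro k hk1 hk2
    have hk : k < xylist.length := by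
      simpa [PySem.List.length_pyRange_one] using hk1
    have hkr : k < (PySem.List.pyRange 0 (xylist.length) 1).length := by
      simpa [PySem.List.length_pyRange_one] using hk
    rw [List.getElem_map, List.getElem_map, List.getElem_zip]
    dsimp only
    have hidx : (PySem.List.pyRange 0 (xylist.length) 1)[k]'hkr = (k : Int) := by
      rw [PySem.List.getElem_pyRange_one]
      simp
    rw [hidx]
    unfold pvF
    have h0 : PySem.List.pyGetD xylist 0 [] = xylist[0]'(by omega) := by
      rw [show (0 : Int) = ((0 : Nat) : Int) by norm_num]
      exact hrow 0 (by omega)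
    by_cases hke : (k : Int) = (xylist.length : Int) - 1
    · rw [if_pos hke]
      rw [hrow k hk, h0, rotated_getElem_last xylist h k hk (by omega)]
    · have hklt : k + 1 < xylist.length := by omega
      rw [if_neg hke]
      rw [hrow k hk, show ((k : Int) + 1) = ((k + 1 : Nat) : Int) by push_cast; ring,
          hrow (k+1) hklt, rotated_getElem_mid xylist k hklt]

theorem getpolypath_spec_aux (xylist : List (List Int)) (h : 1 < xylist.length) :
    getpolypath xylist = getpolypath_alt xylist := by
  unfold getpolypath_alt
  rw [if_neg (by omega)]
  match xylist, h with
  | x0 :: rest, h =>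
    show getpolypath (x0 :: rest) = getpolypathEdges x0 x0 rest
    rw [edges_eq_zip_map x0 rest x0, getpolypath_eq_zip_map (x0 :: rest) h]
    congr 1

-- ===== VERDICT (by name: the statement is the Claim_ definition above) =====
theorem getpolypath_spec : Claim_equal_getpolypath := by
  intro xylist _ _
  unfold Spec_getpolypath
  by_cases h : 1 < xylist.length
  · exact getpolypath_spec_aux xylist h
  · unfold getpolypath getpolypath_alt
    rw [if_neg (by omega), if_pos (by omega)]
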